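-- pv_equiv track=rewrite | github.com/rainbow-tan/rainbow | Cubing/Cubing/Business.py | scarp_data
-- ===== SOURCE A (Python) =====
-- def scarp_data(data):
--     new = []
--     for i, ii in enumerate(data):
--         new_data = [str(i + 1)]
--         for j, k in enumerate(ii):
--             if j == 4:
--                 new_data.append('1')
--             new_data.append(k)
--         new.append(new_data)
--     return new
-- ===== SOURCE B (Python) =====
-- def scarp_data(data):
--     return [[str(i + 1)] + list(ii[:4]) + (['1'] if len(ii) > 4 else []) + list(ii[4:])
--             for i, ii in enumerate(data)]
-- ===== Notes on version B (the rewrite author's own statement) =====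
-- stated objective: simpler
-- what changed: Replaces the accumulator loops (outer append loop and per-element inner loop with a j==4 branch) by a single comprehension that builds each row loop-free from two slices and a length guard.
import Mathlib
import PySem

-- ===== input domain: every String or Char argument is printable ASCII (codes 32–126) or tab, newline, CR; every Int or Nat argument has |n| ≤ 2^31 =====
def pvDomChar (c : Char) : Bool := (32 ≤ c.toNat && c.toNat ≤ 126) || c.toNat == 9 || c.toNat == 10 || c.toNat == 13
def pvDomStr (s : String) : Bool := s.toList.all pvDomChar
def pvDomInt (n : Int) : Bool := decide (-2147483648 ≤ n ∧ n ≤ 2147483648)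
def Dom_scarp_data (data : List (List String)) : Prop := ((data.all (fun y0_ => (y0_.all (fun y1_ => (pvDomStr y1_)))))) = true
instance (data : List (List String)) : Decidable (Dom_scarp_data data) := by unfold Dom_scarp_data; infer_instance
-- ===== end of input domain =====

-- B replaces A's accumulator loops (and the inner j==4 branch) by one comprehension
-- built from two slices and a length guard: simpler, same cost.


-- ===== PORT A =====
def scarp_data (data : List (List String)) : List (List String) :=
  (PySem.List.enumerate data).foldl
    (fun new p =>
      new ++ [(PySem.List.enumerate p.2).foldl
        (fun nd q => (if q.1 = 4 then nd ++ ["1"] else nd) ++ [q.2])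
        [PySem.Int.toStr (p.1 + 1)]])
    []

-- ===== PORT B =====
-- ii[:4] / ii[4:] ported as List.take 4 / List.drop 4 (exact for nonnegative bounds).
def scarp_data_alt (data : List (List String)) : List (List String) :=
  (PySem.List.enumerate data).map
    (fun p =>
      [PySem.Int.toStr (p.1 + 1)] ++ p.2.take 4
        ++ (if p.2.length > 4 then ["1"] else []) ++ p.2.drop 4)

-- ===== PRECONDITION & SPEC =====
def Spec_scarp_data (data : List (List String)) (out : List (List String)) : Prop := out = scarp_data_alt data
instance (data : List (List String)) (out : List (List String)) : Decidable (Spec_scarp_data data out) := by unfold Spec_scarp_data; infer_instance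

-- ===== CLAIM (what is proved, stated in full; the proofs are below) =====
def Claim_equal_scarp_data : Prop := ∀ (data : List (List String)), Dom_scarp_data data → Spec_scarp_data data (scarp_data data)

-- ===== LEMMAS AND PROOFS =====

-- A's inner loop once the index has passed 4: it just appends the elements.
theorem innerA_past (l : List String) (j0 : Int) (h : 4 < j0) (acc : List String) :
    (PySem.List.enumerate l j0).foldl
      (fun nd q => (if q.1 = 4 then nd ++ ["1"] else nd) ++ [q.2]) acc = acc ++ l := by
  induction l generalizing j0 acc with
  | nil => simp [PySem.List.enumerate_nil]
  | cons x xs ih =>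
    rw [PySem.List.enumerate_cons]
    simp only [List.foldl_cons]
    rw [if_neg (by omega)]
    rw [ih (j0 + 1) (by omega)]
    simp

-- A's inner loop at index j0 ≤ 4 equals B's slice construction (offset by j0).
theorem innerA_le (l : List String) (j0 : Int) (h : j0 ≤ 4) (acc : List String) :
    (PySem.List.enumerate l j0).foldl
      (fun nd q => (if q.1 = 4 then nd ++ ["1"] else nd) ++ [q.2]) acc =
    acc ++ l.take (4 - j0).toNat
        ++ (if (4 - j0).toNat < l.length then ["1"] else []) ++ l.drop (4 - j0).toNat := by
  induction l generalizing j0 acc with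
  | nil => simp [PySem.List.enumerate_nil]
  | cons x xs ih =>
    rw [PySem.List.enumerate_cons]
    simp only [List.foldl_cons]
    by_cases h4 : j0 = 4
    · subst h4
      rw [if_pos rfl, show (4:Int)+1 = 5 from rfl, innerA_past xs 5 (by omega)]
      simp
    · rw [if_neg h4, ih (j0 + 1) (by omega)]
      have ht : (4 - j0).toNat = (4 - (j0 + 1)).toNat + 1 := by omega
      rw [ht]
      simp only [List.take_succ_cons, List.drop_succ_cons, List.length_cons]
      have hc : (4 - (j0 + 1)).toNat + 1 < xs.length + 1 ↔ (4 - (j0 + 1)).toNat < xs.length := by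
        omega
      simp [hc]

-- The outer accumulator loop is a map.
theorem foldl_append_map {α β : Type} (f : α → β) (l : List α) (acc : List β) :
    l.foldl (fun new p => new ++ [f p]) acc = acc ++ l.map f := by
  induction l generalizing acc with
  | nil => simp
  | cons x xs ih => simp [ih]

-- ===== VERDICT (by name: the statement is the Claim_ definition above) =====
theorem scarp_data_spec : Claim_equal_scarp_data := by
  intro data _
  show scarp_data data = scarp_data_alt data
  unfold scarp_data scarp_data_alt
  rw [foldl_append_map]
  simp only [List.nil_append]
  apply List.map_congr_left
  intro p _
  rw [innerA_le p.2 0 (by omega)]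
  norm_num [Int.toNat]
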